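-- pv_equiv track=rewrite | github.com/imnnquy/algorithm-training | Blue/Session 7 - DFS/URI_Dudu.py | sim_nao
-- ===== SOURCE A (Python) =====
-- def sim_nao(N, M, graph):
--     visited = [0 for i in range(N + 1)]
--     current_max_visit = 0
--     for i in range(1, N + 1):
--         if visited[i] == 0:
--             s = [i]
--             visited[i] = current_max_visit + 1
--             current_max_visit = visited[i]
--             while len(s) > 0:
--                 u = s[-1]
--                 s.pop()
--                 for v in graph[u]:
--                     if visited[v] == 0:
--                         s.append(v)
--                         visited[v] = current_max_visit
--                     elif visited[v] < current_max_visit: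
--                         continue
--                     else:
--                         return 'SIM'
--
--     return 'NAO'
-- ===== SOURCE B (Python) =====
-- def sim_nao(N, M, graph):
--     # Two-phase reformulation: phase 1 labels every node with a component id
--     # (same discovery order as the judge's traversal); phase 2 counts ALL
--     # intra-component edges globally.  Each component traced from its root
--     # discovers size-1 nodes over edges, so the whole labelling is revisit-free
--     # exactly when the global intra-component edge count equals #nodes - #components.
--     nodes = range(1, N + 1)
--     comp = [0] * (N + 1)
--     c = 0
--     for i in nodes:
--         if comp[i] == 0:
--             c += 1
--             comp[i] = c
--             stack = [i]
--             while stack: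
--                 u = stack.pop()
--                 for v in graph[u]:
--                     if comp[v] == 0:
--                         stack.append(v)
--                         comp[v] = c
--     intra = sum(1 for u in nodes for v in graph[u] if comp[v] == comp[u])
--     return 'NAO' if intra == len(nodes) - c else 'SIM'
-- ===== Notes on version B (the rewrite author's own statement) =====
-- stated objective: alternative
-- what changed: A detects a revisit inline inside the DFS with an early return; B first labels every node with its component id (detection-free traversal) and then decides globally by pure counting: the answer is NAO iff the total number of intra-component edges equals N minus the number of components, so the per-edge comparison chain of A is replaced by one arithmetic identity.
-- outside the precondition, e.g. on sim_nao(2, 1, {1: [1]}): A returns 'SIM', B raises KeyError; on sim_nao(1, 1, {1: [-1]}): A returns 'SIM', B returns 'SIM'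
import Mathlib
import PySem

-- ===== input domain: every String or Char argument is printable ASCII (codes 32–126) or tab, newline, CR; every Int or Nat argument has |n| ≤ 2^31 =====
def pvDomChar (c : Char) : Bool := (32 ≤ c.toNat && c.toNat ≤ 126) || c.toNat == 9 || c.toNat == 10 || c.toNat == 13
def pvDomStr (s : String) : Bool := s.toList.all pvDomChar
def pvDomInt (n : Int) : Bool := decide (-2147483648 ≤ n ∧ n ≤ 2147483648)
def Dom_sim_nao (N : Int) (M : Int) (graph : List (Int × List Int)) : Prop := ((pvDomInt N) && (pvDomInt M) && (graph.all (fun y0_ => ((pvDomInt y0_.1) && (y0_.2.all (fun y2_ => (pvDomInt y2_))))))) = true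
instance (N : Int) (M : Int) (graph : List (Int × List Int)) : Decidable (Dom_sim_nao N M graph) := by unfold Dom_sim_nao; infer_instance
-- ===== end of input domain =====

-- B replaces A's inline early-exit revisit detection by a detection-free labelling pass
-- followed by one global arithmetic test (intra-component edge total = N - #components);
-- objective: alternative (same asymptotic cost).
-- Python integer arrays 'visited'/'comp' are modelled as total maps Int → Int, exact on
-- Pre_ where every accessed index lies in 1..N.

-- ===== PORT A =====

-- graph[u]: first-match lookup (dict convention); `.getD []` is a totality guard,
-- Pre_ guarantees the key is present wherever A looks one up.
def pvAdj (graph : List (Int × List Int)) (u : Int) : List Int :=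
  ((graph.find? (fun p => p.1 == u)).map Prod.snd).getD []

def pvUpd (vis : Int → Int) (v c : Int) : Int → Int := fun x => if x = v then c else vis x

-- finite support used only by the termination measures of the while loops
def pvSupp (N : Int) (graph : List (Int × List Int)) : List Int :=
  PySem.List.pyRange 1 (N+1) 1 ++ (graph.map Prod.snd).flatten

-- A's inner `for v in graph[u]` loop: pushes/marks unvisited v, skips earlier labels,
-- returns none (= `return 'SIM'`) on a label ≥ current_max_visit.
def pvPNA (cm : Int) (vs s : List Int) (vis : Int → Int) : Option (List Int × (Int → Int)) :=
  match vs with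
  | [] => some (s, vis)
  | v :: rest =>
    if vis v = 0 then pvPNA cm rest (s ++ [v]) (pvUpd vis v cm)
    else if vis v < cm then pvPNA cm rest s vis
    else none

lemma pvCountP_upd_le (L : List Int) (vis : Int → Int) (v c : Int) (hc : c ≠ 0) :
    L.countP (fun x => pvUpd vis v c x == 0) ≤ L.countP (fun x => vis x == 0) := by
  apply List.countP_mono_left
  intro x _ hx
  simp only [pvUpd, beq_iff_eq] at hx ⊢
  by_cases hxv : x = v
  · rw [hxv, if_pos rfl] at hx; exact absurd hx hc
  · rwa [if_neg hxv] at hx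

lemma pvCountP_upd_lt (L : List Int) (vis : Int → Int) (v c : Int)
    (hv : v ∈ L) (h0 : vis v = 0) (hc : c ≠ 0) :
    L.countP (fun x => pvUpd vis v c x == 0) < L.countP (fun x => vis x == 0) := by
  induction L with
  | nil => cases hv
  | cons a tl ih =>
    simp only [List.countP_cons]
    by_cases hav : a = v
    · have h1 : (pvUpd vis v c a == 0) = false := by simp [pvUpd, hav, hc]
      have h2 : (vis a == 0) = true := by simp [hav, h0]
      have := pvCountP_upd_le tl vis v c hc
      rw [h1, h2]
      simp only [Bool.false_eq_true, if_false, if_true]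
      omega
    · have heq : (pvUpd vis v c a == 0) = (vis a == 0) := by simp [pvUpd, hav]
      have hvtl : v ∈ tl := by
        rcases List.mem_cons.1 hv with h | h
        · exact absurd h.symm hav
        · exact h
      have := ih hvtl
      rw [heq]
      omega

lemma pvPNA_measure (N : Int) (graph : List (Int × List Int)) (cm : Int) (vs s : List Int)
    (vis : Int → Int) (hc : cm ≠ 0) (hsub : ∀ v ∈ vs, v ∈ pvSupp N graph)
    {s' : List Int} {vis' : Int → Int} (h : pvPNA cm vs s vis = some (s', vis')) :
    2 * ((pvSupp N graph).countP fun x => vis' x == 0) + s'.length ≤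
      2 * ((pvSupp N graph).countP fun x => vis x == 0) + s.length := by
  induction vs generalizing s vis with
  | nil => simp [pvPNA] at h; obtain ⟨rfl, rfl⟩ := h; omega
  | cons v rest ih =>
    simp only [pvPNA] at h
    split_ifs at h with h0 hlt
    · have hdec := pvCountP_upd_lt (pvSupp N graph) vis v cm (hsub v (by simp)) h0 hc
      have := ih (s ++ [v]) (pvUpd vis v cm) (fun x hx => hsub x (by simp [hx])) h
      simp only [List.length_append, List.length_cons, List.length_nil] at this
      omega
    · exact ih s vis (fun x hx => hsub x (by simp [hx])) h

lemma pvAdj_mem (graph : List (Int × List Int)) (u v : Int) (hv : v ∈ pvAdj graph u) :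
    ∃ p ∈ graph, p.1 = u ∧ v ∈ p.2 := by
  unfold pvAdj at hv
  cases hfind : graph.find? (fun p => p.1 == u) with
  | none => rw [hfind] at hv; simp at hv
  | some p =>
    rw [hfind] at hv
    simp only [Option.map_some, Option.getD_some] at hv
    have hp : p ∈ graph := List.mem_of_find?_eq_some hfind
    have hkey : p.1 = u := by simpa using List.find?_some hfind
    exact ⟨p, hp, hkey, hv⟩

lemma pvAdj_sub_supp (N : Int) (graph : List (Int × List Int)) (u : Int) :
    ∀ v ∈ pvAdj graph u, v ∈ pvSupp N graph := by
  intro v hv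
  obtain ⟨p, hp, -, hvp⟩ := pvAdj_mem graph u v hv
  unfold pvSupp
  exact List.mem_append_right _ (List.mem_flatten.2 ⟨p.2, List.mem_map.2 ⟨p, hp, rfl⟩, hvp⟩)

-- A's `while len(s) > 0` loop (stack: Python list, top = last element).
-- The `cm = 0` branch is a totality guard only: every call has cm ≥ 1.
def pvLoopA (N : Int) (graph : List (Int × List Int)) (cm : Int) (s : List Int)
    (vis : Int → Int) : Option (Int → Int) :=
  if hcm : cm = 0 then some vis
  else if hs : s = [] then some vis
  else
    match h : pvPNA cm (pvAdj graph (s.getLast hs)) s.dropLast vis with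
    | none => none
    | some (s', vis') => pvLoopA N graph cm s' vis'
termination_by 2 * ((pvSupp N graph).countP fun x => vis x == 0) + s.length
decreasing_by
  have hm := pvPNA_measure N graph cm _ _ vis hcm (pvAdj_sub_supp N graph _) h
  have hlen : s.dropLast.length = s.length - 1 := by simp
  have hpos : 0 < s.length := List.length_pos_iff.2 hs
  omega

-- A's outer `for i in range(1, N+1)` loop with early return 'SIM'.
def pvOuterA (N : Int) (graph : List (Int × List Int)) (is_ : List Int)
    (vis : Int → Int) (cm : Int) : String :=
  match is_ with
  | [] => "NAO"
  | i :: rest =>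
    if vis i = 0 then
      match pvLoopA N graph (cm+1) [i] (pvUpd vis i (cm+1)) with
      | none => "SIM"
      | some vis' => pvOuterA N graph rest vis' (cm+1)
    else pvOuterA N graph rest vis cm

def sim_nao (N : Int) (M : Int) (graph : List (Int × List Int)) : String :=
  pvOuterA N graph (PySem.List.pyRange 1 (N+1) 1) (fun _ => 0) 0

-- ===== PORT B =====

-- graph[u] in Source B's pass 2 as well as in its labelling pass (first-match lookup;
-- `.getD []` totality guard as on the A side)
def pvLook (graph : List (Int × List Int)) (u : Int) : List Int :=
  (graph.lookup u).getD []

-- Source B's inner `for v in graph[u]` of the labelling pass: a fold over the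
-- adjacency list carrying (stack, comp); no detection, no early exit.
def pvScan (c : Int) (vs s : List Int) (comp : Int → Int) : List Int × (Int → Int) :=
  vs.foldl (fun st v => if st.2 v = 0 then (st.1 ++ [v], Function.update st.2 v c) else st)
    (s, comp)

-- lemmas cited by pvRun's termination proof
lemma pvUpdate_eq (f : Int → Int) (v c : Int) : Function.update f v c = pvUpd f v c := by
  funext x
  simp [Function.update_apply, pvUpd]

lemma pvLook_eq (graph : List (Int × List Int)) (u : Int) : pvLook graph u = pvAdj graph u := by
  unfold pvLook pvAdj
  induction graph with
  | nil => rfl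
  | cons p rest ih =>
    cases p with
    | mk k l =>
      by_cases h : u = k
      · subst h
        simp [List.lookup, List.find?]
      · have h1 : (u == k) = false := beq_eq_false_iff_ne.2 h
        have h2 : (k == u) = false := beq_eq_false_iff_ne.2 (Ne.symm h)
        simp [List.lookup, List.find?, h1, h2, ih]

lemma pvLook_sub_supp (N : Int) (graph : List (Int × List Int)) (u : Int) :
    ∀ v ∈ pvLook graph u, v ∈ pvSupp N graph := by
  rw [pvLook_eq]
  exact pvAdj_sub_supp N graph u

lemma pvScan_measure (N : Int) (graph : List (Int × List Int)) (c : Int) (vs s : List Int)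
    (comp : Int → Int) (hc : c ≠ 0) (hsub : ∀ v ∈ vs, v ∈ pvSupp N graph) :
    2 * ((pvSupp N graph).countP fun x => (pvScan c vs s comp).2 x == 0) +
        (pvScan c vs s comp).1.length ≤
      2 * ((pvSupp N graph).countP fun x => comp x == 0) + s.length := by
  induction vs generalizing s comp with
  | nil => simp [pvScan]
  | cons v rest ih =>
    have hstep : pvScan c (v :: rest) s comp =
        if comp v = 0 then pvScan c rest (s ++ [v]) (Function.update comp v c)
        else pvScan c rest s comp := by
      simp only [pvScan, List.foldl_cons]
      split_ifs <;> rfl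
    rw [hstep]
    split_ifs with h0
    · rw [pvUpdate_eq]
      have hdec := pvCountP_upd_lt (pvSupp N graph) comp v c (hsub v (by simp)) h0 hc
      have := ih (s ++ [v]) (pvUpd comp v c) (fun x hx => hsub x (by simp [hx]))
      simp only [List.length_append, List.length_cons, List.length_nil] at this
      omega
    · exact ih s comp (fun x hx => hsub x (by simp [hx]))

-- Source B's `while stack` loop of the labelling pass (c = 0 branch: totality guard only)
def pvRun (N : Int) (graph : List (Int × List Int)) (c : Int) (s : List Int)
    (comp : Int → Int) : Int → Int :=
  if _hc : c = 0 then comp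
  else if hs : s = [] then comp
  else
    pvRun N graph c (pvScan c (pvLook graph (s.getLast hs)) s.dropLast comp).1
      (pvScan c (pvLook graph (s.getLast hs)) s.dropLast comp).2
termination_by 2 * ((pvSupp N graph).countP fun x => comp x == 0) + s.length
decreasing_by
  have hm := pvScan_measure N graph c (pvLook graph (s.getLast hs)) s.dropLast comp _hc
    (pvLook_sub_supp N graph _)
  have hlen : s.dropLast.length = s.length - 1 := by simp
  have hpos : 0 < s.length := List.length_pos_iff.2 hs
  omega

def sim_nao_alt (N : Int) (M : Int) (graph : List (Int × List Int)) : String :=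
  let R := (PySem.List.pyRange 1 (N+1) 1).foldl
    (fun st i =>
      if st.1 i = 0 then (pvRun N graph (st.2 + 1) [i] (Function.update st.1 i (st.2 + 1)), st.2 + 1)
      else st)
    (fun _ => (0 : Int), (0 : Int))
  let intra : Int := ((PySem.List.pyRange 1 (N+1) 1).map
    (fun u => ((pvLook graph u).countP (fun v => R.1 v == R.1 u) : Int))).sum
  if intra = ((PySem.List.pyRange 1 (N+1) 1).length : Int) - R.2 then "NAO" else "SIM"

-- ===== PRECONDITION & SPEC =====
-- Pre_ = the natural domain: every node 1..N has an adjacency entry (the distinct keys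
-- inside 1..N number exactly max N 0) and all its neighbours lie in 1..N. It excludes inputs where A raises (KeyError/IndexError) and —
-- slightly narrower than that — inputs whose missing key or out-of-range neighbour is only
-- reached after A already returned 'SIM' early, and inputs whose negative neighbours only
-- stay silent through Python's negative-index wraparound: both are accidents of A's list
-- indexing that the natural B need not share (B raises KeyError on the former).
def Pre_sim_nao (N : Int) (M : Int) (graph : List (Int × List Int)) : Prop :=
  ((((graph.map Prod.fst).filter (fun k => decide (1 ≤ k) && decide (k ≤ N))).dedup.length : Int) = max N 0) ∧
  (∀ p ∈ graph, 1 ≤ p.1 → p.1 ≤ N → ∀ v ∈ p.2, 1 ≤ v ∧ v ≤ N)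
instance (N : Int) (M : Int) (graph : List (Int × List Int)) : Decidable (Pre_sim_nao N M graph) := by
  unfold Pre_sim_nao; infer_instance

def pvWitness_sim_nao : Int × Int × (List (Int × List Int)) := (3, 3, [(1, [2]), (2, [3]), (3, [])])

def Spec_sim_nao (N : Int) (M : Int) (graph : List (Int × List Int)) (out : String) : Prop := out = sim_nao_alt N M graph
instance (N : Int) (M : Int) (graph : List (Int × List Int)) (out : String) : Decidable (Spec_sim_nao N M graph out) := by unfold Spec_sim_nao; infer_instance

-- ===== CLAIM (what is proved, stated in full; the proofs are below) =====
def Claim_equal_sim_nao : Prop := ∀ (N : Int) (M : Int) (graph : List (Int × List Int)), Dom_sim_nao N M graph → Pre_sim_nao N M graph → Spec_sim_nao N M graph (sim_nao N M graph)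

-- ===== LEMMAS AND PROOFS =====

-- instrumented inner scan (proof-side): like pvScan but also counts A's 'SIM' events
def pvHitsPN (cm : Int) (vs s : List Int) (vis : Int → Int) : Nat × List Int × (Int → Int) :=
  match vs with
  | [] => (0, s, vis)
  | v :: rest =>
    if vis v = 0 then pvHitsPN cm rest (s ++ [v]) (pvUpd vis v cm)
    else if vis v < cm then pvHitsPN cm rest s vis
    else
      let r := pvHitsPN cm rest s vis
      (r.1 + 1, r.2)

lemma pvScan_eq (cm : Int) (vs s : List Int) (vis : Int → Int) :
    (pvHitsPN cm vs s vis).2 = pvScan cm vs s vis := by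
  induction vs generalizing s vis with
  | nil => simp [pvHitsPN, pvScan]
  | cons v rest ih =>
    have hstep : pvScan cm (v :: rest) s vis =
        if vis v = 0 then pvScan cm rest (s ++ [v]) (Function.update vis v cm)
        else pvScan cm rest s vis := by
      simp only [pvScan, List.foldl_cons]
      split_ifs <;> rfl
    rw [hstep]
    simp only [pvHitsPN]
    split_ifs with h0 hlt
    · rw [pvUpdate_eq]; exact ih _ _
    · exact ih _ _
    · exact ih _ _

-- instrumented while loop: total number of 'SIM' events in one component run
def pvHits (N : Int) (graph : List (Int × List Int)) (cm : Int) (s : List Int)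
    (vis : Int → Int) : Nat :=
  if _hc : cm = 0 then 0
  else if hs : s = [] then 0
  else
    (pvHitsPN cm (pvAdj graph (s.getLast hs)) s.dropLast vis).1 +
      pvHits N graph cm (pvHitsPN cm (pvAdj graph (s.getLast hs)) s.dropLast vis).2.1
        (pvHitsPN cm (pvAdj graph (s.getLast hs)) s.dropLast vis).2.2
termination_by 2 * ((pvSupp N graph).countP fun x => vis x == 0) + s.length
decreasing_by
  have hm := pvScan_measure N graph cm (pvAdj graph (s.getLast hs)) s.dropLast vis _hc
    (pvAdj_sub_supp N graph _)
  rw [← pvScan_eq] at hm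
  have hlen : s.dropLast.length = s.length - 1 := by simp
  have hpos : 0 < s.length := List.length_pos_iff.2 hs
  omega

-- finite universe 1..N, per-node intra-edge count, set of future discoveries
def pvU (N : Int) : Finset Int := (PySem.List.pyRange 1 (N+1) 1).toFinset

def pvCnt (graph : List (Int × List Int)) (F : Int → Int) (cm u : Int) : Nat :=
  (pvAdj graph u).countP (fun v => F v == cm)

def pvDset (N : Int) (vis F : Int → Int) (cm : Int) : Finset Int :=
  (pvU N).filter (fun x => vis x = 0 ∧ F x = cm)

-- invariant of the while loop of component cm
def pvLInv (N : Int) (graph : List (Int × List Int)) (cm : Int) (s : List Int)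
    (vis : Int → Int) : Prop :=
  1 ≤ cm ∧ s.Nodup ∧ (∀ u ∈ s, vis u = cm) ∧ (∀ x, 0 ≤ vis x ∧ vis x ≤ cm) ∧
  (∀ x, vis x ≠ 0 → 1 ≤ x ∧ x ≤ N) ∧
  (∀ u, vis u = cm → u ∉ s → ∀ v ∈ pvAdj graph u, vis v ≠ 0)

-- invariant between components of the outer loop
def pvGInv (N : Int) (graph : List (Int × List Int)) (c : Int) (vis : Int → Int) : Prop :=
  0 ≤ c ∧ (∀ x, 0 ≤ vis x ∧ vis x ≤ c) ∧ (∀ x, vis x ≠ 0 → 1 ≤ x ∧ x ≤ N) ∧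
  (∀ u, vis u ≠ 0 → ∀ v ∈ pvAdj graph u, vis v ≠ 0)

-- fiber of label j, its intra-edge total, and the per-component 'clean' predicate
def pvFib (N : Int) (F : Int → Int) (j : Int) : Finset Int :=
  (pvU N).filter (fun x => F x = j)

def pvS (N : Int) (graph : List (Int × List Int)) (F : Int → Int) (j : Int) : Nat :=
  ∑ u ∈ pvFib N F j, pvCnt graph F j u

def pvOK (N : Int) (graph : List (Int × List Int)) (F : Int → Int) (j : Int) : Prop :=
  pvS N graph F j + 1 = (pvFib N F j).card

def pvAdjOK (N : Int) (graph : List (Int × List Int)) : Prop :=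
  ∀ u, 1 ≤ u → u ≤ N → ∀ v ∈ pvAdj graph u, 1 ≤ v ∧ v ≤ N

lemma pvMem_U (N x : Int) : x ∈ pvU N ↔ 1 ≤ x ∧ x ≤ N := by
  unfold pvU
  rw [List.mem_toFinset, PySem.List.mem_pyRange_one]
  omega

-- the ledger of one neighbour scan: new marks, their properties, and
-- hits + #marks = #(occurrences finally labelled cm)
lemma pvCPN (cm : Int) (vs s : List Int) (vis : Int → Int)
    (hcm : 1 ≤ cm) (hbnd : ∀ x, vis x ≤ cm) :
    ∃ marks : List Int,
      (pvHitsPN cm vs s vis).2.1 = s ++ marks ∧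
      marks.Nodup ∧ (∀ x ∈ marks, vis x = 0 ∧ x ∈ vs) ∧
      (∀ x, (pvHitsPN cm vs s vis).2.2 x = if x ∈ marks then cm else vis x) ∧
      (pvHitsPN cm vs s vis).1 + marks.length =
        vs.countP (fun v => (pvHitsPN cm vs s vis).2.2 v == cm) ∧
      (∀ v ∈ vs, (pvHitsPN cm vs s vis).2.2 v ≠ 0) := by
  induction vs generalizing s vis with
  | nil =>
    refine ⟨[], by simp [pvHitsPN], List.nodup_nil, by simp, ?_, by simp [pvHitsPN], by simp⟩
    intro x; simp [pvHitsPN]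
  | cons v rest ih =>
    by_cases h0 : vis v = 0
    · have hbnd1 : ∀ x, pvUpd vis v cm x ≤ cm := by
        intro x
        unfold pvUpd
        split_ifs with h
        · omega
        · exact hbnd x
      obtain ⟨m1, he1, hnd1, hpr1, hf1, hc1, hnz1⟩ := ih (s ++ [v]) (pvUpd vis v cm) hbnd1
      have hstep : pvHitsPN cm (v :: rest) s vis = pvHitsPN cm rest (s ++ [v]) (pvUpd vis v cm) := by
        simp [pvHitsPN, h0]
      have hvm1 : v ∉ m1 := by
        intro hm; have := (hpr1 v hm).1; simp [pvUpd] at this; omega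
      refine ⟨v :: m1, ?_, ?_, ?_, ?_, ?_, ?_⟩
      · rw [hstep, he1]; simp
      · exact List.nodup_cons.2 ⟨hvm1, hnd1⟩
      · intro x hx
        rcases List.mem_cons.1 hx with rfl | hx2
        · exact ⟨h0, by simp⟩
        · have h1 := hpr1 x hx2
          have hxv : x ≠ v := by rintro rfl; exact hvm1 hx2
          refine ⟨?_, by simp [h1.2]⟩
          have := h1.1; simpa [pvUpd, hxv] using this
      · intro x
        rw [hstep, hf1 x]
        by_cases hxv : x = v
        · subst hxv; simp [hvm1, pvUpd]
        · simp only [List.mem_cons, hxv, false_or]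
          split_ifs with h <;> simp [pvUpd, hxv]
      · rw [hstep]
        have hfv : (pvHitsPN cm rest (s ++ [v]) (pvUpd vis v cm)).2.2 v = cm := by
          rw [hf1 v]; simp [hvm1, pvUpd]
        rw [List.countP_cons]
        simp only [hfv, beq_self_eq_true, if_pos, List.length_cons]
        omega
      · intro w hw
        rw [hstep]
        rcases List.mem_cons.1 hw with rfl | hw
        · rw [hf1 w, if_neg hvm1]
          have hww : pvUpd vis w cm w = cm := by simp [pvUpd]
          rw [hww]
          omega
        · exact hnz1 w hw
    · obtain ⟨m1, he1, hnd1, hpr1, hf1, hc1, hnz1⟩ := ih s vis hbnd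
      have hvm1 : v ∉ m1 := fun hm => h0 (hpr1 v hm).1
      have hfv : (pvHitsPN cm rest s vis).2.2 v = vis v := by rw [hf1 v]; simp [hvm1]
      by_cases hlt : vis v < cm
      · have hstep : pvHitsPN cm (v :: rest) s vis = pvHitsPN cm rest s vis := by
          simp [pvHitsPN, h0, hlt]
        refine ⟨m1, by rw [hstep, he1], hnd1, ?_, by rw [hstep]; exact hf1, ?_, ?_⟩
        · intro x hx; exact ⟨(hpr1 x hx).1, by simp [(hpr1 x hx).2]⟩
        · rw [hstep, List.countP_cons]
          have : ((pvHitsPN cm rest s vis).2.2 v == cm) = false := by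
            rw [hfv]; simp; omega
          simp only [this, Bool.false_eq_true, if_false]
          omega
        · intro w hw
          rw [hstep]
          rcases List.mem_cons.1 hw with rfl | hw
          · rw [hfv]; exact h0
          · exact hnz1 w hw
      · have hstep : pvHitsPN cm (v :: rest) s vis =
            ((pvHitsPN cm rest s vis).1 + 1, (pvHitsPN cm rest s vis).2) := by
          simp [pvHitsPN, h0, hlt]
        have hveq : vis v = cm := by have := hbnd v; omega
        refine ⟨m1, by rw [hstep]; exact he1, hnd1, ?_, by rw [hstep]; exact hf1, ?_, ?_⟩
        · intro x hx; exact ⟨(hpr1 x hx).1, by simp [(hpr1 x hx).2]⟩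
        · rw [hstep, List.countP_cons]
          simp only
          have : ((pvHitsPN cm rest s vis).2.2 v == cm) = true := by
            rw [hfv, hveq]; simp
          simp only [this, if_pos]
          omega
        · intro w hw
          rw [hstep]
          rcases List.mem_cons.1 hw with rfl | hw
          · rw [hfv]; exact h0
          · exact hnz1 w hw

lemma pvRun_zero (N : Int) (graph : List (Int × List Int)) (s : List Int)
    (vis : Int → Int) : pvRun N graph 0 s vis = vis := by
  rw [pvRun]; simp

lemma pvRun_nil (N : Int) (graph : List (Int × List Int)) (c : Int)
    (vis : Int → Int) : pvRun N graph c [] vis = vis := by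
  rw [pvRun]; split_ifs with h1 h2
  · rfl
  · rfl
  · exact absurd rfl h2

lemma pvRun_step (N : Int) (graph : List (Int × List Int)) (c : Int) (s : List Int)
    (vis : Int → Int) (hc : ¬c = 0) (hs : ¬s = []) :
    pvRun N graph c s vis =
      pvRun N graph c (pvHitsPN c (pvAdj graph (s.getLast hs)) s.dropLast vis).2.1
        (pvHitsPN c (pvAdj graph (s.getLast hs)) s.dropLast vis).2.2 := by
  conv_lhs => rw [pvRun]
  rw [dif_neg hc, dif_neg hs, pvLook_eq, ← pvScan_eq]

lemma pvHits_zero (N : Int) (graph : List (Int × List Int)) (s : List Int)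
    (vis : Int → Int) : pvHits N graph 0 s vis = 0 := by
  rw [pvHits]; simp

lemma pvHits_nil (N : Int) (graph : List (Int × List Int)) (c : Int)
    (vis : Int → Int) : pvHits N graph c [] vis = 0 := by
  rw [pvHits]; split_ifs with h1 h2
  · rfl
  · rfl
  · exact absurd rfl h2

lemma pvHits_step (N : Int) (graph : List (Int × List Int)) (c : Int) (s : List Int)
    (vis : Int → Int) (hc : ¬c = 0) (hs : ¬s = []) :
    pvHits N graph c s vis =
      (pvHitsPN c (pvAdj graph (s.getLast hs)) s.dropLast vis).1 +
        pvHits N graph c (pvHitsPN c (pvAdj graph (s.getLast hs)) s.dropLast vis).2.1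
          (pvHitsPN c (pvAdj graph (s.getLast hs)) s.dropLast vis).2.2 := by
  conv_lhs => rw [pvHits]
  simp [hc, hs]

lemma pvLoopA_zero (N : Int) (graph : List (Int × List Int)) (s : List Int)
    (vis : Int → Int) : pvLoopA N graph 0 s vis = some vis := by
  rw [pvLoopA]; simp

lemma pvLoopA_nil (N : Int) (graph : List (Int × List Int)) (c : Int)
    (vis : Int → Int) : pvLoopA N graph c [] vis = some vis := by
  rw [pvLoopA]; split_ifs with h1 h2
  · rfl
  · rfl
  · exact absurd rfl h2

-- every value pvRun changes was 0 and becomes cm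
lemma pvRun_change (N : Int) (graph : List (Int × List Int)) (cm : Int) (s : List Int)
    (vis : Int → Int) (hcm : 1 ≤ cm) (hbnd : ∀ x, vis x ≤ cm) :
    ∀ x, pvRun N graph cm s vis x = vis x ∨
      (vis x = 0 ∧ pvRun N graph cm s vis x = cm) := by
  revert hcm hbnd
  induction s, vis using pvHits.induct (N := N) (graph := graph) (cm := cm) with
  | case1 s vis hc =>
    intro hcm _ x; exact absurd hc (by omega)
  | case2 vis hc =>
    intro _ _ x; left; rw [pvRun_nil]
  | case3 s vis hc hs ih =>
    intro hcm hbnd x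
    obtain ⟨marks, he, hnd, hpr, hf, hcnt, hnz⟩ :=
      pvCPN cm (pvAdj graph (s.getLast hs)) s.dropLast vis hcm hbnd
    have hbnd1 : ∀ y, (pvHitsPN cm (pvAdj graph (s.getLast hs)) s.dropLast vis).2.2 y ≤ cm := by
      intro y
      rw [hf y]
      split_ifs
      · omega
      · exact hbnd y
    rw [pvRun_step N graph cm s vis hc hs]
    rcases ih hcm hbnd1 x with h | ⟨h0, hcval⟩
    · rw [h, hf x]
      split_ifs with hm
      · exact Or.inr ⟨(hpr x hm).1, rfl⟩
      · exact Or.inl rfl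
    · rw [hf x] at h0
      split_ifs at h0 with hm
      · omega
      · exact Or.inr ⟨h0, hcval⟩

lemma pvRun_stab (N : Int) (graph : List (Int × List Int)) (cm : Int) (s : List Int)
    (vis : Int → Int) (hcm : 1 ≤ cm) (hbnd : ∀ x, vis x ≤ cm) (x : Int)
    (hx : vis x ≠ 0) : pvRun N graph cm s vis x = vis x := by
  rcases pvRun_change N graph cm s vis hcm hbnd x with h | ⟨h0, _⟩
  · exact h
  · exact absurd h0 hx

-- one pop step preserves the loop invariant
lemma pvLStep (N : Int) (graph : List (Int × List Int)) (cm : Int) (s : List Int)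
    (vis : Int → Int) (hok : pvAdjOK N graph) (hs : s ≠ [])
    (hinv : pvLInv N graph cm s vis) :
    pvLInv N graph cm (pvHitsPN cm (pvAdj graph (s.getLast hs)) s.dropLast vis).2.1
      (pvHitsPN cm (pvAdj graph (s.getLast hs)) s.dropLast vis).2.2 := by
  obtain ⟨hcm, hnd, hstk, hbnd, hrg, hsat⟩ := hinv
  obtain ⟨marks, he, hndm, hpr, hf, hcnt, hnz⟩ :=
    pvCPN cm (pvAdj graph (s.getLast hs)) s.dropLast vis hcm (fun x => (hbnd x).2)
  have hu : vis (s.getLast hs) = cm := hstk _ (List.getLast_mem hs)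
  have huN : 1 ≤ s.getLast hs ∧ s.getLast hs ≤ N := hrg _ (by omega)
  have hmarksN : ∀ x ∈ marks, 1 ≤ x ∧ x ≤ N := fun x hx =>
    hok _ huN.1 huN.2 x (hpr x hx).2
  have hs0 : s.dropLast ++ [s.getLast hs] = s := List.dropLast_append_getLast hs
  have hnd0 : s.dropLast.Nodup := hnd.sublist (List.dropLast_sublist s)
  have hstk0 : ∀ x ∈ s.dropLast, vis x = cm := fun x hx =>
    hstk x (by rw [← hs0]; exact List.mem_append_left _ hx)
  have hdisj : ∀ x ∈ marks, x ∉ s.dropLast := by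
    intro x hx hxs
    have := hstk0 x hxs
    have := (hpr x hx).1
    omega
  refine ⟨hcm, ?_, ?_, ?_, ?_, ?_⟩
  · rw [he]
    rw [List.nodup_append]
    refine ⟨hnd0, hndm, ?_⟩
    intro a ha b hb heq
    exact hdisj b hb (heq ▸ ha)
  · intro x hx
    rw [he] at hx
    rw [hf x]
    rcases List.mem_append.1 hx with hx | hx
    · rw [if_neg (fun hm => hdisj x hm hx)]
      exact hstk0 x hx
    · rw [if_pos hx]
  · intro x
    rw [hf x]
    split_ifs
    · omega
    · exact hbnd x
  · intro x hx
    rw [hf x] at hx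
    split_ifs at hx with hm
    · exact hmarksN x hm
    · exact hrg x hx
  · intro w hw hwnot v hv
    rw [hf w] at hw
    rw [he] at hwnot
    have hwm : w ∉ marks := fun hm => hwnot (List.mem_append_right _ hm)
    rw [if_neg hwm] at hw
    by_cases hwu : w = s.getLast hs
    · subst hwu
      exact hnz v hv
    · have hwns : w ∉ s := by
        rw [← hs0]
        intro hmem
        rcases List.mem_append.1 hmem with h | h
        · exact hwnot (List.mem_append_left _ h)
        · simp at h; exact hwu h
      have := hsat w hw hwns v hv
      rw [hf v]
      split_ifs with hm
      · omega
      · exact this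

lemma pvRun_post (N : Int) (graph : List (Int × List Int)) (cm : Int) (s : List Int)
    (vis : Int → Int) (hok : pvAdjOK N graph) (hinv : pvLInv N graph cm s vis) :
    pvLInv N graph cm [] (pvRun N graph cm s vis) := by
  revert hinv
  induction s, vis using pvHits.induct (N := N) (graph := graph) (cm := cm) with
  | case1 s vis hc =>
    intro hinv; exact absurd hc (by have := hinv.1; omega)
  | case2 vis hc =>
    intro hinv; rw [pvRun_nil]; exact hinv
  | case3 s vis hc hs ih =>
    intro hinv
    have hstep := pvLStep N graph cm s vis hok hs hinv
    rw [pvRun_step N graph cm s vis hc hs]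
    exact ih hstep

lemma pvLoopA_step_none (N : Int) (graph : List (Int × List Int)) (c : Int) (s : List Int)
    (vis : Int → Int) (hc : ¬c = 0) (hs : ¬s = [])
    (hpn : pvPNA c (pvAdj graph (s.getLast hs)) s.dropLast vis = none) :
    pvLoopA N graph c s vis = none := by
  conv_lhs => rw [pvLoopA]
  rw [dif_neg hc, dif_neg hs]
  split
  · rfl
  · next s' vis' heq => rw [hpn] at heq; cases heq

lemma pvLoopA_step_some (N : Int) (graph : List (Int × List Int)) (c : Int) (s : List Int)
    (vis : Int → Int) (hc : ¬c = 0) (hs : ¬s = []) (s' : List Int) (vis' : Int → Int)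
    (hpn : pvPNA c (pvAdj graph (s.getLast hs)) s.dropLast vis = some (s', vis')) :
    pvLoopA N graph c s vis = pvLoopA N graph c s' vis' := by
  conv_lhs => rw [pvLoopA]
  rw [dif_neg hc, dif_neg hs]
  split
  · next heq => rw [hpn] at heq; cases heq
  · next s1 vis1 heq =>
    rw [hpn] at heq
    cases heq
    rfl

-- A's neighbour scan against the instrumented one
lemma pvPNA_eq (cm : Int) (vs s : List Int) (vis : Int → Int) :
    pvPNA cm vs s vis =
      if (pvHitsPN cm vs s vis).1 = 0 then
        some ((pvHitsPN cm vs s vis).2.1, (pvHitsPN cm vs s vis).2.2)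
      else none := by
  induction vs generalizing s vis with
  | nil => simp [pvPNA, pvHitsPN]
  | cons v rest ih =>
    by_cases h0 : vis v = 0
    · simp only [pvPNA, pvHitsPN, h0, if_pos]
      exact ih _ _
    · by_cases hlt : vis v < cm
      · simp only [pvPNA, pvHitsPN, h0, hlt, if_false, if_pos]
        exact ih _ _
      · simp only [pvPNA, pvHitsPN, h0, hlt, if_false]
        simp

-- A's while loop = B's labelling loop + hit detection
lemma pvLoopA_eq (N : Int) (graph : List (Int × List Int)) (cm : Int) (s : List Int)
    (vis : Int → Int) :
    pvLoopA N graph cm s vis =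
      if pvHits N graph cm s vis = 0 then some (pvRun N graph cm s vis) else none := by
  induction s, vis using pvHits.induct (N := N) (graph := graph) (cm := cm) with
  | case1 s vis hc =>
    rw [hc] at *
    rw [pvLoopA_zero, pvHits_zero, pvRun_zero, if_pos rfl]
  | case2 vis hc =>
    rw [pvLoopA_nil, pvHits_nil, pvRun_nil, if_pos rfl]
  | case3 s vis hc hs ih =>
    have hpneq := pvPNA_eq cm (pvAdj graph (s.getLast hs)) s.dropLast vis
    by_cases hz : (pvHitsPN cm (pvAdj graph (s.getLast hs)) s.dropLast vis).1 = 0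
    · rw [if_pos hz] at hpneq
      have hstepA := pvLoopA_step_some N graph cm s vis hc hs _ _ hpneq
      rw [hstepA]
      rw [pvRun_step N graph cm s vis hc hs, pvHits_step N graph cm s vis hc hs]
      rw [hz, Nat.zero_add]
      exact ih
    · rw [if_neg hz] at hpneq
      rw [pvLoopA_step_none N graph cm s vis hc hs hpneq]
      rw [pvHits_step N graph cm s vis hc hs]
      rw [if_neg (by omega)]

-- the counting identity: hits + discoveries = intra edges of component cm
lemma pvCount (N : Int) (graph : List (Int × List Int)) (hok : pvAdjOK N graph) :
    ∀ cm s vis, pvLInv N graph cm s vis →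
      pvHits N graph cm s vis +
        (pvDset N vis (pvRun N graph cm s vis) cm).card =
      ∑ u ∈ (s.toFinset ∪ pvDset N vis (pvRun N graph cm s vis) cm),
        pvCnt graph (pvRun N graph cm s vis) cm u := by
  intro cm s vis
  induction s, vis using pvHits.induct (N := N) (graph := graph) (cm := cm) with
  | case1 s vis hc =>
    intro hinv; exact absurd hc (by have := hinv.1; omega)
  | case2 vis hc =>
    intro hinv
    rw [pvHits_nil, pvRun_nil]
    have hD : pvDset N vis vis cm = ∅ := by
      apply Finset.eq_empty_of_forall_notMem
      intro x hx
      simp only [pvDset, Finset.mem_filter] at hx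
      have := hinv.1
      omega
    rw [hD]
    simp
  | case3 s vis hc hs ih =>
    intro hinv
    obtain ⟨hcm, hnd, hstk, hbnd, hrg, hsat⟩ := hinv
    have hinv' : pvLInv N graph cm s vis := ⟨hcm, hnd, hstk, hbnd, hrg, hsat⟩
    have hstepI := pvLStep N graph cm s vis hok hs hinv'
    obtain ⟨marks, he, hndm, hpr, hf, hcnt, hnz⟩ :=
      pvCPN cm (pvAdj graph (s.getLast hs)) s.dropLast vis hcm (fun x => (hbnd x).2)
    rw [pvHits_step N graph cm s vis hc hs, pvRun_step N graph cm s vis hc hs]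
    rcases hr : pvHitsPN cm (pvAdj graph (s.getLast hs)) s.dropLast vis with ⟨h1, s1, vis1⟩
    rw [hr] at ih he hf hcnt hnz hstepI
    dsimp only at ih he hf hcnt hnz hstepI ⊢
    have hbnd1 : ∀ x, vis1 x ≤ cm := fun x => (hstepI.2.2.2.1 x).2
    have hstab : ∀ x, vis1 x ≠ 0 → pvRun N graph cm s1 vis1 x = vis1 x := fun x hx =>
      pvRun_stab N graph cm s1 vis1 hcm hbnd1 x hx
    have hu7 : vis (s.getLast hs) = cm := hstk _ (List.getLast_mem hs)
    have huN : 1 ≤ s.getLast hs ∧ s.getLast hs ≤ N := hrg _ (by omega)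
    have hmarksN : ∀ x ∈ marks, 1 ≤ x ∧ x ≤ N := fun x hx =>
      hok _ huN.1 huN.2 x (hpr x hx).2
    have humarks : s.getLast hs ∉ marks := by
      intro hm; have := (hpr _ hm).1; omega
    have hs0 : s.dropLast ++ [s.getLast hs] = s := List.dropLast_append_getLast hs
    have hu_s0 : s.getLast hs ∉ s.dropLast := by
      have hnd' := hnd
      rw [← hs0] at hnd'
      have hdis : s.dropLast.Disjoint [s.getLast hs] := List.disjoint_of_nodup_append hnd'
      intro hu0
      exact hdis hu0 (by simp)
    have hvis1_marks : ∀ x ∈ marks, vis1 x = cm := fun x hx => by rw [hf x, if_pos hx]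
    have hvis1_not : ∀ x, x ∉ marks → vis1 x = vis x := fun x hx => by rw [hf x, if_neg hx]
    have hDset : pvDset N vis (pvRun N graph cm s1 vis1) cm =
        pvDset N vis1 (pvRun N graph cm s1 vis1) cm ∪ marks.toFinset := by
      ext x
      simp only [pvDset, Finset.mem_union, Finset.mem_filter, List.mem_toFinset]
      constructor
      · rintro ⟨hxU, hx0, hxF⟩
        by_cases hm : x ∈ marks
        · exact Or.inr hm
        · exact Or.inl ⟨hxU, by rw [hvis1_not x hm]; exact hx0, hxF⟩
      · rintro (⟨hxU, hx0, hxF⟩ | hm)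
        · have hxm : x ∉ marks := by
            intro hm; rw [hvis1_marks x hm] at hx0; omega
          refine ⟨hxU, ?_, hxF⟩
          rw [← hvis1_not x hxm]
          exact hx0
        · refine ⟨(pvMem_U N x).2 (hmarksN x hm), (hpr x hm).1, ?_⟩
          rw [hstab x (by rw [hvis1_marks x hm]; omega)]
          exact hvis1_marks x hm
    have hdisjD : Disjoint (pvDset N vis1 (pvRun N graph cm s1 vis1) cm) marks.toFinset := by
      rw [Finset.disjoint_left]
      intro x hx hm
      simp only [pvDset, Finset.mem_filter] at hx
      rw [List.mem_toFinset] at hm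
      have := hvis1_marks x hm
      have := hx.2.1
      omega
    have hsets : s.toFinset ∪ pvDset N vis (pvRun N graph cm s1 vis1) cm =
        insert (s.getLast hs) (s1.toFinset ∪ pvDset N vis1 (pvRun N graph cm s1 vis1) cm) := by
      rw [hDset]
      conv_lhs => rw [← hs0]
      ext x
      simp only [he, Finset.mem_insert, Finset.mem_union, List.mem_toFinset, List.mem_append,
        List.mem_singleton]
      tauto
    have hu_notin : s.getLast hs ∉
        s1.toFinset ∪ pvDset N vis1 (pvRun N graph cm s1 vis1) cm := by
      rw [he]
      simp only [Finset.mem_union, List.mem_toFinset, List.mem_append]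
      rintro ((h | h) | h)
      · exact hu_s0 h
      · exact humarks h
      · simp only [pvDset, Finset.mem_filter] at h
        have h0 := h.2.1
        rw [hvis1_not _ humarks] at h0
        omega
    have hcntu : pvCnt graph (pvRun N graph cm s1 vis1) cm (s.getLast hs) =
        h1 + marks.length := by
      unfold pvCnt
      have hcg : ∀ v ∈ pvAdj graph (s.getLast hs),
          ((pvRun N graph cm s1 vis1 v == cm) = true ↔ (vis1 v == cm) = true) := by
        intro v hv
        rw [hstab v (hnz v hv)]
      rw [List.countP_congr hcg, ← hcnt]
    have hmlen : marks.toFinset.card = marks.length := List.toFinset_card_of_nodup hndm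
    have hih := ih hstepI
    rw [hsets, Finset.sum_insert hu_notin, hDset,
      Finset.card_union_of_disjoint hdisjD, hcntu, hmlen]
    omega

lemma pvLInv_start (N : Int) (graph : List (Int × List Int)) (c i : Int)
    (vis : Int → Int) (hg : pvGInv N graph c vis) (hi : vis i = 0)
    (hiN : 1 ≤ i ∧ i ≤ N) :
    pvLInv N graph (c+1) [i] (pvUpd vis i (c+1)) := by
  obtain ⟨hc0, hbnd, hrg, hsat⟩ := hg
  refine ⟨by omega, by simp, ?_, ?_, ?_, ?_⟩
  · intro u hu
    simp only [List.mem_singleton] at hu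
    subst hu
    simp [pvUpd]
  · intro x
    unfold pvUpd
    split_ifs
    · omega
    · have := hbnd x; omega
  · intro x hx
    unfold pvUpd at hx
    split_ifs at hx with hxi
    · subst hxi; exact hiN
    · exact hrg x hx
  · intro u hu hu2 v hv
    exfalso
    unfold pvUpd at hu
    split_ifs at hu with hui
    · exact hu2 (by simp [hui])
    · have := hbnd u; omega

lemma pvGInv_next (N : Int) (graph : List (Int × List Int)) (hok : pvAdjOK N graph)
    (c i : Int) (vis : Int → Int) (hg : pvGInv N graph c vis) (hi : vis i = 0)
    (hiN : 1 ≤ i ∧ i ≤ N) :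
    pvGInv N graph (c+1) (pvRun N graph (c+1) [i] (pvUpd vis i (c+1))) := by
  have hc0 : 0 ≤ c := hg.1
  have hstart := pvLInv_start N graph c i vis hg hi hiN
  have hpost := pvRun_post N graph (c+1) [i] (pvUpd vis i (c+1)) hok hstart
  obtain ⟨hcm1, -, -, hbnd1, hrg1, hsat1⟩ := hpost
  have hbnd0 : ∀ x, pvUpd vis i (c+1) x ≤ c + 1 := fun x => (hstart.2.2.2.1 x).2
  have hstab := pvRun_stab N graph (c+1) [i] (pvUpd vis i (c+1)) (by omega) hbnd0
  have hch := pvRun_change N graph (c+1) [i] (pvUpd vis i (c+1)) (by omega) hbnd0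
  refine ⟨by omega, hbnd1, hrg1, ?_⟩
  intro u hu v hv
  by_cases hucm : pvRun N graph (c+1) [i] (pvUpd vis i (c+1)) u = c + 1
  · exact hsat1 u hucm (by simp) v hv
  · have hueq : pvRun N graph (c+1) [i] (pvUpd vis i (c+1)) u = pvUpd vis i (c+1) u := by
      rcases hch u with h | ⟨h0, hcv⟩
      · exact h
      · exact absurd hcv hucm
    rw [hueq] at hu
    have hui : u ≠ i := by
      intro h; subst h; simp [pvUpd] at hu hucm; rw [hueq] at hucm; simp [pvUpd] at hucm
    have huv : vis u ≠ 0 := by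
      unfold pvUpd at hu; rw [if_neg hui] at hu; exact hu
    have := hg.2.2.2 u huv v hv
    have hv0 : pvUpd vis i (c+1) v ≠ 0 := by
      unfold pvUpd
      split_ifs with h
      · omega
      · exact this
    rw [hstab v hv0]
    exact hv0

-- fiber and intra-count transport along a label-preserving iff
lemma pvFib_congr (N : Int) (F G : Int → Int) (j : Int)
    (h : ∀ x, F x = j ↔ G x = j) : pvFib N F j = pvFib N G j := by
  unfold pvFib
  exact Finset.filter_congr (fun x _ => by simpa using h x)

lemma pvS_congr (N : Int) (graph : List (Int × List Int)) (F G : Int → Int) (j : Int)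
    (h : ∀ x, F x = j ↔ G x = j) : pvS N graph F j = pvS N graph G j := by
  unfold pvS
  rw [pvFib_congr N F G j h]
  refine Finset.sum_congr rfl (fun u _ => ?_)
  unfold pvCnt
  apply List.countP_congr
  intro v _
  simp only [beq_iff_eq]
  constructor
  · intro hv; exact (h v).1 hv
  · intro hv; exact (h v).2 hv

-- the component born at root i: its intra-edge total at the end of its own trace
-- exceeds (size - 1) by exactly the number of 'SIM' events A would have scored
lemma pvBirth (N : Int) (graph : List (Int × List Int)) (hok : pvAdjOK N graph)
    (c i : Int) (vis : Int → Int) (hg : pvGInv N graph c vis) (hi : vis i = 0)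
    (hiN : 1 ≤ i ∧ i ≤ N) :
    pvS N graph (pvRun N graph (c+1) [i] (pvUpd vis i (c+1))) (c+1) + 1 =
      (pvFib N (pvRun N graph (c+1) [i] (pvUpd vis i (c+1))) (c+1)).card +
        pvHits N graph (c+1) [i] (pvUpd vis i (c+1)) ∧
    1 ≤ (pvFib N (pvRun N graph (c+1) [i] (pvUpd vis i (c+1))) (c+1)).card := by
  have hc0 : 0 ≤ c := hg.1
  have hstart := pvLInv_start N graph c i vis hg hi hiN
  have hcount := pvCount N graph hok (c+1) [i] (pvUpd vis i (c+1)) hstart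
  have hbnd0 : ∀ x, pvUpd vis i (c+1) x ≤ c + 1 := fun x => (hstart.2.2.2.1 x).2
  have hstab := pvRun_stab N graph (c+1) [i] (pvUpd vis i (c+1)) (by omega) hbnd0
  have hch := pvRun_change N graph (c+1) [i] (pvUpd vis i (c+1)) (by omega) hbnd0
  have hvis0i : pvUpd vis i (c+1) i = c + 1 := by simp [pvUpd]
  have hF1i : pvRun N graph (c+1) [i] (pvUpd vis i (c+1)) i = c + 1 := by
    rw [hstab i (by rw [hvis0i]; omega)]; exact hvis0i
  have hinotD : i ∉ pvDset N (pvUpd vis i (c+1))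
      (pvRun N graph (c+1) [i] (pvUpd vis i (c+1))) (c+1) := by
    simp only [pvDset, Finset.mem_filter]
    rintro ⟨-, h0, -⟩
    omega
  have hfil : pvFib N (pvRun N graph (c+1) [i] (pvUpd vis i (c+1))) (c+1) =
      insert i (pvDset N (pvUpd vis i (c+1))
        (pvRun N graph (c+1) [i] (pvUpd vis i (c+1))) (c+1)) := by
    ext x
    simp only [pvFib, Finset.mem_filter, Finset.mem_insert, pvDset]
    constructor
    · rintro ⟨hxU, hxF⟩
      by_cases hxi : x = i
      · exact Or.inl hxi
      · refine Or.inr ⟨hxU, ?_, hxF⟩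
        rcases hch x with h | ⟨h0, -⟩
        · rw [h] at hxF
          unfold pvUpd at hxF
          rw [if_neg hxi] at hxF
          have := hg.2.1 x
          omega
        · unfold pvUpd at h0
          rw [if_neg hxi] at h0
          unfold pvUpd
          rw [if_neg hxi]
          exact h0
    · rintro (rfl | hx)
      · exact ⟨(pvMem_U N x).2 hiN, hF1i⟩
      · exact ⟨hx.1, hx.2.2⟩
  have hone : ([i] : List Int).toFinset = {i} := by simp
  rw [hone] at hcount
  have hins : ({i} : Finset Int) ∪ pvDset N (pvUpd vis i (c+1))
      (pvRun N graph (c+1) [i] (pvUpd vis i (c+1))) (c+1) =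
      insert i (pvDset N (pvUpd vis i (c+1))
        (pvRun N graph (c+1) [i] (pvUpd vis i (c+1))) (c+1)) := by
    ext x; simp
  rw [hins] at hcount
  have hSsum : pvS N graph (pvRun N graph (c+1) [i] (pvUpd vis i (c+1))) (c+1) =
      ∑ u ∈ insert i (pvDset N (pvUpd vis i (c+1))
          (pvRun N graph (c+1) [i] (pvUpd vis i (c+1))) (c+1)),
        pvCnt graph (pvRun N graph (c+1) [i] (pvUpd vis i (c+1))) (c+1) u := by
    unfold pvS
    rw [hfil]
  constructor
  · rw [hSsum, hfil, Finset.card_insert_of_notMem hinotD]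
    omega
  · rw [hfil, Finset.card_insert_of_notMem hinotD]
    omega

-- Source B's outer labelling loop, as the fold the port performs
def pvOB (N : Int) (graph : List (Int × List Int)) (is_ : List Int)
    (st : (Int → Int) × Int) : (Int → Int) × Int :=
  is_.foldl
    (fun st i =>
      if st.1 i = 0 then (pvRun N graph (st.2 + 1) [i] (Function.update st.1 i (st.2 + 1)), st.2 + 1)
      else st)
    st

lemma pvOB_nil (N : Int) (graph : List (Int × List Int)) (st : (Int → Int) × Int) :
    pvOB N graph [] st = st := rfl

lemma pvOB_cons_pos (N : Int) (graph : List (Int × List Int)) (i : Int) (rest : List Int)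
    (vis : Int → Int) (c : Int) (hvi : vis i = 0) :
    pvOB N graph (i :: rest) (vis, c) =
      pvOB N graph rest (pvRun N graph (c+1) [i] (pvUpd vis i (c+1)), c+1) := by
  simp only [pvOB, List.foldl_cons]
  rw [if_pos hvi, pvUpdate_eq]

lemma pvOB_cons_neg (N : Int) (graph : List (Int × List Int)) (i : Int) (rest : List Int)
    (vis : Int → Int) (c : Int) (hvi : ¬vis i = 0) :
    pvOB N graph (i :: rest) (vis, c) = pvOB N graph rest (vis, c) := by
  simp only [pvOB, List.foldl_cons]
  rw [if_neg hvi]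

lemma pvOB_cnt (N : Int) (graph : List (Int × List Int)) :
    ∀ (is_ : List Int) (vis : Int → Int) (c : Int), c ≤ (pvOB N graph is_ (vis, c)).2 := by
  intro is_
  induction is_ with
  | nil => intro vis c; exact le_refl c
  | cons i rest ih =>
    intro vis c
    by_cases hvi : vis i = 0
    · rw [pvOB_cons_pos N graph i rest vis c hvi]
      have := ih (pvRun N graph (c+1) [i] (pvUpd vis i (c+1))) (c+1)
      omega
    · rw [pvOB_cons_neg N graph i rest vis c hvi]
      exact ih vis c

-- the outer labelling only writes labels > c into zero entries
lemma pvOB_change (N : Int) (graph : List (Int × List Int)) (hok : pvAdjOK N graph) :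
    ∀ (is_ : List Int) (vis : Int → Int) (c : Int), pvGInv N graph c vis →
      (∀ i ∈ is_, 1 ≤ i ∧ i ≤ N) →
      ∀ x, (pvOB N graph is_ (vis, c)).1 x = vis x ∨
        (vis x = 0 ∧ c < (pvOB N graph is_ (vis, c)).1 x) := by
  intro is_
  induction is_ with
  | nil => intro vis c hg his x; left; rfl
  | cons i rest ih =>
    intro vis c hg his x
    by_cases hvi : vis i = 0
    · have hiN := his i (by simp)
      have hg1 := pvGInv_next N graph hok c i vis hg hvi hiN
      have hc0 : 0 ≤ c := hg.1
      have hbnd0 : ∀ y, pvUpd vis i (c+1) y ≤ c + 1 :=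
        fun y => ((pvLInv_start N graph c i vis hg hvi hiN).2.2.2.1 y).2
      have hch := pvRun_change N graph (c+1) [i] (pvUpd vis i (c+1)) (by omega) hbnd0
      rw [pvOB_cons_pos N graph i rest vis c hvi]
      rcases ih (pvRun N graph (c+1) [i] (pvUpd vis i (c+1))) (c+1) hg1
          (fun j hj => his j (by simp [hj])) x with h | ⟨h0, hgt⟩
      · rw [h]
        rcases hch x with h2 | ⟨h20, h2c⟩
        · rw [h2]
          unfold pvUpd
          split_ifs with hxi
          · subst hxi; exact Or.inr ⟨hvi, by omega⟩
          · exact Or.inl rfl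
        · unfold pvUpd at h20
          split_ifs at h20 with hxi
          · omega
          · exact Or.inr ⟨h20, by rw [h2c]; omega⟩
      · have hx0 : pvUpd vis i (c+1) x = 0 := by
          rcases hch x with h2 | ⟨h20, h2c⟩
          · rw [← h2]; exact h0
          · exact h20
        unfold pvUpd at hx0
        split_ifs at hx0 with hxi
        · omega
        · exact Or.inr ⟨hx0, by omega⟩
    · rw [pvOB_cons_neg N graph i rest vis c hvi]
      exact ih vis c hg (fun j hj => his j (by simp [hj])) x

lemma pvOB_ginv (N : Int) (graph : List (Int × List Int)) (hok : pvAdjOK N graph) :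
    ∀ (is_ : List Int) (vis : Int → Int) (c : Int), pvGInv N graph c vis →
      (∀ i ∈ is_, 1 ≤ i ∧ i ≤ N) →
      pvGInv N graph (pvOB N graph is_ (vis, c)).2 (pvOB N graph is_ (vis, c)).1 := by
  intro is_
  induction is_ with
  | nil => intro vis c hg his; exact hg
  | cons i rest ih =>
    intro vis c hg his
    by_cases hvi : vis i = 0
    · have hiN := his i (by simp)
      have hg1 := pvGInv_next N graph hok c i vis hg hvi hiN
      rw [pvOB_cons_pos N graph i rest vis c hvi]
      exact ih _ _ hg1 (fun j hj => his j (by simp [hj]))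
    · rw [pvOB_cons_neg N graph i rest vis c hvi]
      exact ih vis c hg (fun j hj => his j (by simp [hj]))

lemma pvOB_covers (N : Int) (graph : List (Int × List Int)) (hok : pvAdjOK N graph) :
    ∀ (is_ : List Int) (vis : Int → Int) (c : Int), pvGInv N graph c vis →
      (∀ i ∈ is_, 1 ≤ i ∧ i ≤ N) →
      ∀ i ∈ is_, (pvOB N graph is_ (vis, c)).1 i ≠ 0 := by
  intro is_
  induction is_ with
  | nil => intro vis c hg his i hi; cases hi
  | cons i rest ih =>
    intro vis c hg his i' hi'
    by_cases hvi : vis i = 0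
    · have hiN := his i (by simp)
      have hg1 := pvGInv_next N graph hok c i vis hg hvi hiN
      have hc0 : 0 ≤ c := hg.1
      rw [pvOB_cons_pos N graph i rest vis c hvi]
      rcases List.mem_cons.1 hi' with rfl | hrest
      · have hbnd0 : ∀ y, pvUpd vis i' (c+1) y ≤ c + 1 :=
          fun y => ((pvLInv_start N graph c i' vis hg hvi hiN).2.2.2.1 y).2
        have hstab := pvRun_stab N graph (c+1) [i'] (pvUpd vis i' (c+1)) (by omega) hbnd0
        have hF1i : pvRun N graph (c+1) [i'] (pvUpd vis i' (c+1)) i' = c + 1 := by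
          rw [hstab i' (by simp [pvUpd]; omega)]; simp [pvUpd]
        rcases pvOB_change N graph hok rest (pvRun N graph (c+1) [i'] (pvUpd vis i' (c+1))) (c+1)
            hg1 (fun j hj => his j (by simp [hj])) i' with h | ⟨h0, hgt⟩
        · rw [h, hF1i]; omega
        · omega
      · exact ih _ _ hg1 (fun j hj => his j (by simp [hj])) i' hrest
    · rw [pvOB_cons_neg N graph i rest vis c hvi]
      rcases List.mem_cons.1 hi' with rfl | hrest
      · rcases pvOB_change N graph hok rest vis c hg
            (fun j hj => his j (by simp [hj])) i' with h | ⟨h0, hgt⟩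
        · rw [h]; exact hvi
        · have hc0 : 0 ≤ c := hg.1; omega
      · exact ih vis c hg (fun j hj => his j (by simp [hj])) i' hrest

-- the outer loops aligned: A answers 'NAO' iff every component born by the labelling
-- pass is clean (intra-edge total + 1 = size); and every born component satisfies
-- size ≤ intra-edge total + 1, size ≥ 1
lemma pvMain (N : Int) (graph : List (Int × List Int)) (hok : pvAdjOK N graph) :
    ∀ (is_ : List Int) (vis : Int → Int) (c : Int),
      pvGInv N graph c vis → (∀ i ∈ is_, 1 ≤ i ∧ i ≤ N) →
      ((pvOuterA N graph is_ vis c = "NAO" ↔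
        ∀ j, c < j → j ≤ (pvOB N graph is_ (vis, c)).2 →
          pvOK N graph (pvOB N graph is_ (vis, c)).1 j) ∧
       (∀ j, c < j → j ≤ (pvOB N graph is_ (vis, c)).2 →
          (pvFib N (pvOB N graph is_ (vis, c)).1 j).card ≤
            pvS N graph (pvOB N graph is_ (vis, c)).1 j + 1 ∧
          1 ≤ (pvFib N (pvOB N graph is_ (vis, c)).1 j).card)) := by
  intro is_
  induction is_ with
  | nil =>
    intro vis c hg his
    constructor
    · constructor
      · intro _ j hj1 hj2
        rw [pvOB_nil] at hj2
        omega
      · intro _; rfl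
    · intro j hj1 hj2
      rw [pvOB_nil] at hj2
      omega
  | cons i rest ih =>
    intro vis c hg his
    have hc0 : 0 ≤ c := hg.1
    by_cases hvi : vis i = 0
    · have hiN := his i (by simp)
      have hg1 := pvGInv_next N graph hok c i vis hg hvi hiN
      have hbirth := pvBirth N graph hok c i vis hg hvi hiN
      have hAeq := pvLoopA_eq N graph (c+1) [i] (pvUpd vis i (c+1))
      have hOBstep := pvOB_cons_pos N graph i rest vis c hvi
      have hIH := ih (pvRun N graph (c+1) [i] (pvUpd vis i (c+1))) (c+1) hg1
        (fun l hl => his l (by simp [hl]))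
      -- fiber of label c+1 is frozen by the rest of the outer loop
      have hcngr : ∀ x,
          (pvOB N graph rest (pvRun N graph (c+1) [i] (pvUpd vis i (c+1)), c+1)).1 x = c+1 ↔
          pvRun N graph (c+1) [i] (pvUpd vis i (c+1)) x = c+1 := by
        intro x
        rcases pvOB_change N graph hok rest (pvRun N graph (c+1) [i] (pvUpd vis i (c+1))) (c+1)
            hg1 (fun l hl => his l (by simp [hl])) x with h | ⟨h0, hgt⟩
        · rw [h]
        · constructor
          · intro hx; omega
          · intro hx; omega
      have hfibc : pvFib N (pvOB N graph rest
            (pvRun N graph (c+1) [i] (pvUpd vis i (c+1)), c+1)).1 (c+1) =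
          pvFib N (pvRun N graph (c+1) [i] (pvUpd vis i (c+1))) (c+1) :=
        pvFib_congr N _ _ (c+1) hcngr
      have hSc : pvS N graph (pvOB N graph rest
            (pvRun N graph (c+1) [i] (pvUpd vis i (c+1)), c+1)).1 (c+1) =
          pvS N graph (pvRun N graph (c+1) [i] (pvUpd vis i (c+1))) (c+1) :=
        pvS_congr N graph _ _ (c+1) hcngr
      have hcle : c + 1 ≤ (pvOB N graph rest
          (pvRun N graph (c+1) [i] (pvUpd vis i (c+1)), c+1)).2 :=
        pvOB_cnt N graph rest (pvRun N graph (c+1) [i] (pvUpd vis i (c+1))) (c+1)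
      by_cases hz : pvHits N graph (c+1) [i] (pvUpd vis i (c+1)) = 0
      · rw [if_pos hz] at hAeq
        have hstepA : pvOuterA N graph (i :: rest) vis c =
            pvOuterA N graph rest (pvRun N graph (c+1) [i] (pvUpd vis i (c+1))) (c+1) := by
          simp [pvOuterA, hvi, hAeq]
        have hOK1 : pvOK N graph (pvOB N graph rest
            (pvRun N graph (c+1) [i] (pvUpd vis i (c+1)), c+1)).1 (c+1) := by
          unfold pvOK
          rw [hSc, hfibc, hbirth.1, hz]
          omega
        rw [hOBstep] at *
        rw [hstepA]
        constructor
        · rw [hIH.1]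
          constructor
          · intro h j hj1 hj2
            by_cases hjc : j = c + 1
            · subst hjc; exact hOK1
            · exact h j (by omega) hj2
          · intro h j hj1 hj2
            exact h j (by omega) hj2
        · intro j hj1 hj2
          by_cases hjc : j = c + 1
          · subst hjc
            rw [hSc, hfibc]
            refine ⟨by rw [hbirth.1, hz]; omega, hbirth.2⟩
          · exact hIH.2 j (by omega) hj2
      · rw [if_neg hz] at hAeq
        have hstepA : pvOuterA N graph (i :: rest) vis c = "SIM" := by
          simp [pvOuterA, hvi, hAeq]
        rw [hOBstep] at *
        rw [hstepA]
        constructor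
        · constructor
          · intro h; exact absurd h (by decide)
          · intro hall
            exfalso
            have hOKc := hall (c+1) (by omega) hcle
            unfold pvOK at hOKc
            rw [hSc, hfibc] at hOKc
            rw [hbirth.1] at hOKc
            omega
        · intro j hj1 hj2
          by_cases hjc : j = c + 1
          · subst hjc
            rw [hSc, hfibc]
            refine ⟨by rw [hbirth.1]; omega, hbirth.2⟩
          · exact hIH.2 j (by omega) hj2
    · have hstepA : pvOuterA N graph (i :: rest) vis c = pvOuterA N graph rest vis c := by
        simp [pvOuterA, hvi]
      rw [pvOB_cons_neg N graph i rest vis c hvi, hstepA]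
      exact ih vis c hg (fun l hl => his l (by simp [hl]))

lemma pvOuterA_cases (N : Int) (graph : List (Int × List Int)) :
    ∀ (is_ : List Int) (vis : Int → Int) (c : Int),
      pvOuterA N graph is_ vis c = "NAO" ∨ pvOuterA N graph is_ vis c = "SIM" := by
  intro is_
  induction is_ with
  | nil => intro vis c; left; rfl
  | cons i rest ih =>
    intro vis c
    by_cases hvi : vis i = 0
    · cases h : pvLoopA N graph (c+1) [i] (pvUpd vis i (c+1)) with
      | none => right; simp [pvOuterA, hvi, h]
      | some vis' =>
        have hstep : pvOuterA N graph (i :: rest) vis c = pvOuterA N graph rest vis' (c+1) := by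
          simp [pvOuterA, hvi, h]
        rw [hstep]
        exact ih vis' (c+1)
    · have hstep : pvOuterA N graph (i :: rest) vis c = pvOuterA N graph rest vis c := by
        simp [pvOuterA, hvi]
      rw [hstep]
      exact ih vis c

-- assembly facts about the finished labelling
lemma pvUcard (N : Int) : (pvU N).card = N.toNat := by
  unfold pvU
  rw [List.toFinset_card_of_nodup (PySem.List.nodup_pyRange_one 1 (N+1)),
    PySem.List.length_pyRange_one]
  omega

-- ===== VERDICT (by name: the statement is the Claim_ definition above) =====
theorem sim_nao_spec : Claim_equal_sim_nao := by
  intro N M graph _hdom hpre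
  obtain ⟨_hcover, hrange⟩ := hpre
  have hok : pvAdjOK N graph := by
    intro u hu1 hu2 v hv
    obtain ⟨p, hp, hpk, hvp⟩ := pvAdj_mem graph u v hv
    exact hrange p hp (by omega) (by omega) v hvp
  have hg0 : pvGInv N graph 0 (fun _ => (0:Int)) :=
    ⟨le_refl 0, fun x => ⟨le_refl 0, le_refl 0⟩, fun x hx => absurd rfl hx,
      fun u hu => absurd rfl hu⟩
  have his : ∀ i ∈ PySem.List.pyRange 1 (N+1) 1, 1 ≤ i ∧ i ≤ N := by
    intro i hi
    rw [PySem.List.mem_pyRange_one] at hi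
    omega
  have hmain := pvMain N graph hok (PySem.List.pyRange 1 (N+1) 1) (fun _ => 0) 0 hg0 his
  have hgfin := pvOB_ginv N graph hok (PySem.List.pyRange 1 (N+1) 1) (fun _ => 0) 0 hg0 his
  have hcov := pvOB_covers N graph hok (PySem.List.pyRange 1 (N+1) 1) (fun _ => 0) 0 hg0 his
  have hC0 := pvOB_cnt N graph (PySem.List.pyRange 1 (N+1) 1) (fun _ => 0) 0
  have hA0 : sim_nao N M graph = pvOuterA N graph (PySem.List.pyRange 1 (N+1) 1) (fun _ => 0) 0 := rfl
  have hBeq : sim_nao_alt N M graph =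
      (if (((PySem.List.pyRange 1 (N+1) 1).map
            (fun u => ((pvLook graph u).countP
              (fun v => (pvOB N graph (PySem.List.pyRange 1 (N+1) 1) (fun _ => (0:Int), (0:Int))).1 v ==
                (pvOB N graph (PySem.List.pyRange 1 (N+1) 1) (fun _ => (0:Int), (0:Int))).1 u) : Int))).sum =
          ((PySem.List.pyRange 1 (N+1) 1).length : Int) -
            (pvOB N graph (PySem.List.pyRange 1 (N+1) 1) (fun _ => (0:Int), (0:Int))).2)
        then "NAO" else "SIM") := rfl
  set F := (pvOB N graph (PySem.List.pyRange 1 (N+1) 1) (fun _ => (0:Int), (0:Int))).1 with hF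
  set C := (pvOB N graph (PySem.List.pyRange 1 (N+1) 1) (fun _ => (0:Int), (0:Int))).2 with hC
  set L : Finset Int := (PySem.List.pyRange 1 (C+1) 1).toFinset with hL
  have hjmem : ∀ j, j ∈ L ↔ (0 < j ∧ j ≤ C) := by
    intro j
    rw [hL, List.mem_toFinset, PySem.List.mem_pyRange_one]
    omega
  have hmaps : ∀ u ∈ pvU N, F u ∈ L := by
    intro u hu
    rw [pvMem_U] at hu
    have hne : F u ≠ 0 := hcov u (by rw [PySem.List.mem_pyRange_one]; omega)
    have hb := hgfin.2.1 u
    rw [hjmem]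
    omega
  have hbnds : ∀ j ∈ L, (pvFib N F j).card ≤ pvS N graph F j + 1 := by
    intro j hj
    have := (hjmem j).1 hj
    exact (hmain.2 j this.1 this.2).1
  have hpos : ∀ j ∈ L, 1 ≤ (pvFib N F j).card := by
    intro j hj
    have := (hjmem j).1 hj
    exact (hmain.2 j this.1 this.2).2
  have hsum1 : ∑ j ∈ L, pvS N graph F j = ∑ u ∈ pvU N, pvCnt graph F (F u) u := by
    rw [← Finset.sum_fiberwise_of_maps_to hmaps (fun u => pvCnt graph F (F u) u)]
    refine Finset.sum_congr rfl (fun j hj => ?_)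
    unfold pvS pvFib
    refine Finset.sum_congr rfl (fun u hu => ?_)
    have hu2 : F u = j := (Finset.mem_filter.1 hu).2
    rw [hu2]
  have hcard : (pvU N).card = ∑ j ∈ L, (pvFib N F j).card := by
    rw [Finset.card_eq_sum_card_fiberwise hmaps]
    rfl
  have hLcard : L.card = C.toNat := by
    rw [hL, List.toFinset_card_of_nodup (PySem.List.nodup_pyRange_one 1 (C+1)),
      PySem.List.length_pyRange_one]
    omega
  have hiff2 : (∀ j, 0 < j → j ≤ C → pvOK N graph F j) ↔
      (∑ u ∈ pvU N, pvCnt graph F (F u) u) + C.toNat = N.toNat := by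
    constructor
    · intro h
      have heq : ∑ j ∈ L, (pvS N graph F j + 1) = ∑ j ∈ L, (pvFib N F j).card :=
        Finset.sum_congr rfl (fun j hj => (h j ((hjmem j).1 hj).1 ((hjmem j).1 hj).2))
      rw [Finset.sum_add_distrib, Finset.sum_const, smul_eq_mul, mul_one] at heq
      rw [← hsum1, ← pvUcard N, hcard, ← hLcard]
      omega
    · intro h j hj1 hj2
      by_contra hno
      have hjL : j ∈ L := (hjmem j).2 ⟨hj1, hj2⟩
      have hlt : (pvFib N F j).card < pvS N graph F j + 1 :=
        lt_of_le_of_ne (hbnds j hjL) (fun he => hno he.symm)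
      have hslt := Finset.sum_lt_sum hbnds ⟨j, hjL, hlt⟩
      rw [Finset.sum_add_distrib, Finset.sum_const, smul_eq_mul, mul_one] at hslt
      rw [← pvUcard N, hcard] at h
      rw [hsum1] at hslt
      omega
  have hcnt_eq : ∀ u, ((pvLook graph u).countP (fun v => F v == F u)) = pvCnt graph F (F u) u := by
    intro u
    rw [pvLook_eq]
    rfl
  have hIB : (((PySem.List.pyRange 1 (N+1) 1).map
        (fun u => ((pvLook graph u).countP (fun v => F v == F u) : Int))).sum) =
      ((∑ u ∈ pvU N, pvCnt graph F (F u) u : Nat) : Int) := by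
    have h1 : ((∑ u ∈ pvU N, pvCnt graph F (F u) u : Nat) : Int) =
        ∑ u ∈ pvU N, (pvCnt graph F (F u) u : Int) := by
      push_cast
      rfl
    rw [h1]
    unfold pvU
    rw [List.sum_toFinset _ (PySem.List.nodup_pyRange_one 1 (N+1))]
    refine congrArg List.sum (List.map_congr_left (fun u hu => ?_))
    rw [hcnt_eq u]
  have hcond : (sim_nao N M graph = "NAO") ↔
      (((PySem.List.pyRange 1 (N+1) 1).map
        (fun u => ((pvLook graph u).countP (fun v => F v == F u) : Int))).sum =
        ((PySem.List.pyRange 1 (N+1) 1).length : Int) - C) := by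
    rw [hA0, hmain.1, hIB]
    have hNt : ((PySem.List.pyRange 1 (N+1) 1).length : Int) = (N.toNat : Int) := by
      rw [PySem.List.length_pyRange_one]
      congr 1
      omega
    have hCt : (C.toNat : Int) = C := Int.toNat_of_nonneg hC0
    rw [hiff2, hNt]
    omega
  show sim_nao N M graph = sim_nao_alt N M graph
  rcases pvOuterA_cases N graph (PySem.List.pyRange 1 (N+1) 1) (fun _ => 0) 0 with hA | hA
  · have hna : sim_nao N M graph = "NAO" := by rw [hA0, hA]
    rw [hna, hBeq, if_pos (hcond.1 hna)]
  · have hsi : sim_nao N M graph = "SIM" := by rw [hA0, hA]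
    have hnot : ¬(((PySem.List.pyRange 1 (N+1) 1).map
        (fun u => ((pvLook graph u).countP (fun v => F v == F u) : Int))).sum =
        ((PySem.List.pyRange 1 (N+1) 1).length : Int) - C) := by
      intro hcc
      have := hcond.2 hcc
      rw [hsi] at this
      exact absurd this (by decide)
    rw [hsi, hBeq, if_neg hnot]
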